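-- pv_equiv track=rewrite | github.com/Miriiz/RefactAI | _.github/workflows/src/docGeneration/utils/function.py | getCountLineComment
-- ===== SOURCE A (Python) =====
-- def getCountLineComment(funct):
--     count = 0
--     stop = False
--     for c in reversed(funct):
--         if c.startswith('#') and stop is False:
--             count += 1
--         else:
--             stop = True
--     return count
-- ===== SOURCE B (Python) =====
-- def getCountLineComment(funct):
--     last = -1
--     for i, c in enumerate(funct):
--         if not c.startswith('#'):
--             last = i
--     return len(funct) - 1 - last
-- ===== Notes on version B (the rewrite author's own statement) =====
-- stated objective: alternative
-- what changed: Replaces the backward accumulate-with-stop-flag loop by a forward scan that records the index of the last non-comment line and returns len(funct) - 1 - last as closed-form arithmetic.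
import Mathlib
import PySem

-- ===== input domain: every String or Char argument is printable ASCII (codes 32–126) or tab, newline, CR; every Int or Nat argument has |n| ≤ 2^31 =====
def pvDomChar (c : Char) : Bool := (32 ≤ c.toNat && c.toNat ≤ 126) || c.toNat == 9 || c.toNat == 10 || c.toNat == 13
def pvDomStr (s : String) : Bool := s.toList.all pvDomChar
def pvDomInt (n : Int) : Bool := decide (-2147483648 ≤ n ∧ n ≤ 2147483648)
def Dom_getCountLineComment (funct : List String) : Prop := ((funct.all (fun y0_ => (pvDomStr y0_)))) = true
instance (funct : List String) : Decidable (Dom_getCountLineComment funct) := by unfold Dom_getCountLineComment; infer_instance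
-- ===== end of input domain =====

-- B replaces A's backward stop-flag loop by a forward scan for the last non-comment index plus closed-form arithmetic (alternative decomposition, same cost).

-- ===== PORT A =====
-- one loop step of A: state (count, stop)
def stepA (st : Int × Bool) (c : String) : Int × Bool :=
  if PySem.Str.startswith c "#" && !st.2 then (st.1 + 1, st.2) else (st.1, true)

def getCountLineComment (funct : List String) : Int :=
  (funct.reverse.foldl stepA ((0 : Int), false)).1

-- ===== PORT B =====
-- index of the last line NOT starting with '#' (-1 if none), forward enumerate scan
def lastNonComment (funct : List String) : Int :=
  (PySem.List.enumerate funct).foldl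
    (fun last p => if !(PySem.Str.startswith p.2 "#") then p.1 else last) (-1 : Int)

def getCountLineComment_alt (funct : List String) : Int :=
  (funct.length : Int) - 1 - lastNonComment funct

-- ===== PRECONDITION & SPEC =====
def Spec_getCountLineComment (funct : List String) (out : Int) : Prop := out = getCountLineComment_alt funct
instance (funct : List String) (out : Int) : Decidable (Spec_getCountLineComment funct out) := by unfold Spec_getCountLineComment; infer_instance

-- ===== CLAIM (what is proved, stated in full; the proofs are below) =====
def Claim_equal_getCountLineComment : Prop := ∀ (funct : List String), Dom_getCountLineComment funct → Spec_getCountLineComment funct (getCountLineComment funct)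

-- ===== LEMMAS AND PROOFS =====

theorem foldA_true (xs : List String) (c : Int) : xs.foldl stepA (c, true) = (c, true) := by
  induction xs generalizing c with
  | nil => rfl
  | cons h t ih => simp [List.foldl, stepA, ih]

theorem foldA_shift (xs : List String) (c : Int) :
    (xs.foldl stepA (c, false)).1 = c + (xs.foldl stepA (0, false)).1 := by
  induction xs generalizing c with
  | nil => simp
  | cons h t ih =>
    rw [List.foldl_cons, List.foldl_cons]
    by_cases hs : PySem.Chars.startswith h.toList ['#'] = true
    · have h1 : stepA (c, false) h = (c + 1, false) := by simp [stepA, hs]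
      have h2 : stepA (0, false) h = (1, false) := by simp [stepA, hs]
      rw [h1, h2, ih (c + 1), ih 1]
      omega
    · have h1 : stepA (c, false) h = (c, true) := by simp [stepA, hs]
      have h2 : stepA (0, false) h = (0, true) := by simp [stepA, hs]
      rw [h1, h2, foldA_true, foldA_true]
      simp

theorem lastNC_append (l : List String) (x : String) :
    lastNonComment (l ++ [x]) =
      if PySem.Chars.startswith x.toList ['#'] = true then lastNonComment l else (l.length : Int) := by
  simp only [lastNonComment, PySem.List.enumerate_append, List.foldl_append,
    PySem.List.enumerate_cons, PySem.List.enumerate_nil, List.foldl_cons, List.foldl_nil]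
  by_cases hs : PySem.Chars.startswith x.toList ['#'] = true <;> simp [hs]

theorem main_eq (funct : List String) : getCountLineComment funct = getCountLineComment_alt funct := by
  induction funct using List.reverseRecOn with
  | nil => rfl
  | append_singleton l x ih =>
    have hB : getCountLineComment_alt (l ++ [x]) =
        ((l.length : Int) + 1) - 1 -
          (if PySem.Chars.startswith x.toList ['#'] = true then lastNonComment l else (l.length : Int)) := by
      simp [getCountLineComment_alt, lastNC_append]
    rw [getCountLineComment, List.reverse_append, List.reverse_singleton,
      List.singleton_append, List.foldl_cons]
    by_cases hs : PySem.Chars.startswith x.toList ['#'] = true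
    · have h1 : stepA ((0 : Int), false) x = (1, false) := by simp [stepA, hs]
      rw [h1, foldA_shift]
      rw [if_pos hs] at hB
      have ihB : (l.reverse.foldl stepA ((0 : Int), false)).1 =
          (l.length : Int) - 1 - lastNonComment l := ih
      rw [hB, ihB]
      omega
    · have h1 : stepA ((0 : Int), false) x = (0, true) := by simp [stepA, hs]
      rw [h1, foldA_true, if_neg hs] at *
      rw [hB]
      omega

-- ===== VERDICT (by name: the statement is the Claim_ definition above) =====
theorem getCountLineComment_spec : Claim_equal_getCountLineComment := by
  intro funct _
  exact main_eq funct
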